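-- pv_equiv track=rewrite | github.com/nathangeology/k8s_simulation_quick_v2 | scripts/run_balanced_threshold_sim.py | extract_decision_counts
-- ===== SOURCE A (Python) =====
-- def extract_decision_counts(timeseries):
--     """Extract consolidation decision counts from timeseries snapshots."""
--     total = 0
--     accepted = 0
--     rejected = 0
--     for snap in timeseries:
--         total = max(total, snap.get("consolidation_decisions_total", 0))
--         accepted = max(accepted, snap.get("consolidation_decisions_accepted", 0))
--         rejected = max(rejected, snap.get("consolidation_decisions_rejected", 0))
--     return {"total": total, "accepted": accepted, "rejected": rejected}
-- ===== SOURCE B (Python) =====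
-- def extract_decision_counts(timeseries):
--     """Extract consolidation decision counts from timeseries snapshots."""
--     merged = {}
--     for snap in timeseries:
--         for key, value in snap.items():
--             if key not in merged or value > merged[key]:
--                 merged[key] = value
--     return {name: max(0, merged.get("consolidation_decisions_" + name, 0))
--             for name in ("total", "accepted", "rejected")}
-- ===== Notes on version B (the rewrite author's own statement) =====
-- stated objective: alternative
-- what changed: Instead of one loop carrying three per-key running maxima, B first max-merges all snapshots into a single key-to-maximum dict over every key present, then projects the three decision-count fields (floored at 0) out of that merged dict.
import Mathlib
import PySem

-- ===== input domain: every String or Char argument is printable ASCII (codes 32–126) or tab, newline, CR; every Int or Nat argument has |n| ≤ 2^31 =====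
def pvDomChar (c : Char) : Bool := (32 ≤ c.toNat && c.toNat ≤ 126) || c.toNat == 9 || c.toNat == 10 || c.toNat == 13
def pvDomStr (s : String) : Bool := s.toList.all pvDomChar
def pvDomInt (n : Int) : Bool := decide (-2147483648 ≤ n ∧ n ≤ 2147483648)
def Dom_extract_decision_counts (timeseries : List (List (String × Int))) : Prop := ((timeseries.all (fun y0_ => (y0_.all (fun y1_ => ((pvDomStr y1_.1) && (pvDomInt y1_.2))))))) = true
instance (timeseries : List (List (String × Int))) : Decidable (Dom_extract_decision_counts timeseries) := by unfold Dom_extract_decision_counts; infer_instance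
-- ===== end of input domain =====

-- B merges all snapshots into one key→running-maximum dict and projects the three
-- decision-count fields from it (alternative data structure, same cost).


-- ===== PORT A =====
-- snap.get(key, 0): Python dict lookup with default
def snapGet (snap : List (String × Int)) (key : String) : Int :=
  PySem.Dict.getD (PySem.Dict.mk snap) key 0

-- one pass over the snapshots, three running maxima carried together
def extract_decision_counts (timeseries : List (List (String × Int))) : List (String × Int) :=
  let s := timeseries.foldl
    (fun (acc : Int × Int × Int) snap =>
      (max acc.1 (snapGet snap "consolidation_decisions_total"),
       max acc.2.1 (snapGet snap "consolidation_decisions_accepted"),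
       max acc.2.2 (snapGet snap "consolidation_decisions_rejected")))
    (0, 0, 0)
  [("total", s.1), ("accepted", s.2.1), ("rejected", s.2.2)]

-- ===== PORT B =====
-- `if key not in merged or value > merged[key]: merged[key] = value`
def mergeStep (d : PySem.Dict String Int) (kv : String × Int) : PySem.Dict String Int :=
  match PySem.Dict.get? d kv.1 with
  | none => PySem.Dict.insert d kv.1 kv.2
  | some v => if kv.2 > v then PySem.Dict.insert d kv.1 kv.2 else d

-- the nested merge loop: for snap in timeseries: for key, value in snap.items(): …
def mergedDict (timeseries : List (List (String × Int))) : PySem.Dict String Int :=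
  timeseries.foldl (fun d snap => snap.foldl mergeStep d) PySem.Dict.empty

def extract_decision_counts_alt (timeseries : List (List (String × Int))) : List (String × Int) :=
  let merged := mergedDict timeseries
  ["total", "accepted", "rejected"].map
    (fun name => (name, max 0 (PySem.Dict.getD merged ("consolidation_decisions_" ++ name) 0)))

-- ===== PRECONDITION & SPEC =====
-- Pre_ excludes snapshot lists with a duplicated key inside one snapshot: such lists do not
-- represent any Python dict (A's parameter type), and A's first-match lookup vs B's
-- all-occurrence merge on them is an accident of the association-list encoding.
def Pre_extract_decision_counts (timeseries : List (List (String × Int))) : Prop :=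
  ∀ snap ∈ timeseries, (snap.map Prod.fst).Nodup
instance (timeseries : List (List (String × Int))) : Decidable (Pre_extract_decision_counts timeseries) := by unfold Pre_extract_decision_counts; infer_instance

def pvWitness_extract_decision_counts : (List (List (String × Int))) :=
  [[("consolidation_decisions_total", 3), ("consolidation_decisions_accepted", 2)], []]

def Spec_extract_decision_counts (timeseries : List (List (String × Int))) (out : List (String × Int)) : Prop := out = extract_decision_counts_alt timeseries
instance (timeseries : List (List (String × Int))) (out : List (String × Int)) : Decidable (Spec_extract_decision_counts timeseries out) := by unfold Spec_extract_decision_counts; infer_instance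

-- ===== CLAIM (what is proved, stated in full; the proofs are below) =====
def Claim_equal_extract_decision_counts : Prop := ∀ (timeseries : List (List (String × Int))), Dom_extract_decision_counts timeseries → Pre_extract_decision_counts timeseries → Spec_extract_decision_counts timeseries (extract_decision_counts timeseries)

-- ===== LEMMAS AND PROOFS =====

-- combining an existing optional maximum with an optional new value
def omerge : Option Int → Option Int → Option Int
  | a, none => a
  | none, some v => some v
  | some a, some v => some (max a v)

-- one snapshot's inner merge loop, described at the level of lookups
theorem get?_foldl_mergeStep (snap : List (String × Int)) (hnd : (snap.map Prod.fst).Nodup)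
    (d : PySem.Dict String Int) (k : String) :
    (snap.foldl mergeStep d).get? k
      = omerge (d.get? k) ((PySem.Dict.mk snap).get? k) := by
  induction snap generalizing d with
  | nil => rfl
  | cons hd tl ih =>
      obtain ⟨k0, v0⟩ := hd
      simp only [List.map_cons, List.nodup_cons] at hnd
      simp only [List.foldl_cons, ih hnd.2, PySem.Dict.get?_mk_cons]
      by_cases hk : k0 = k
      · subst hk
        have htl : (PySem.Dict.mk tl).get? k0 = none := by
          rw [PySem.Dict.get?_eq_none_iff_not_mem_keys]
          simpa [PySem.Dict.keys_mk] using hnd.1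
        rw [htl]
        simp only [beq_self_eq_true, if_true]
        unfold mergeStep
        cases h : d.get? k0 with
        | none => simp [PySem.Dict.get?_insert_self, omerge]
        | some a =>
            dsimp only
            split_ifs with hgt
            · simp [PySem.Dict.get?_insert_self, omerge, max_eq_right (le_of_lt hgt)]
            · simp [h, omerge, max_eq_left (not_lt.mp hgt)]
      · have hbeq : (k0 == k) = false := by simpa using hk
        simp only [hbeq, Bool.false_eq_true, if_false]
        have : (mergeStep d (k0, v0)).get? k = d.get? k := by
          unfold mergeStep
          cases h : d.get? k0 with
          | none => exact PySem.Dict.get?_insert_of_ne _ _ (fun h' => hk h'.symm)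
          | some a =>
              dsimp only
              split_ifs
              · exact PySem.Dict.get?_insert_of_ne _ _ (fun h' => hk h'.symm)
              · rfl
        rw [this]

-- the whole merged dict, as an omerge-fold over the snapshots
theorem get?_mergedFold (ts : List (List (String × Int)))
    (hnd : ∀ snap ∈ ts, (snap.map Prod.fst).Nodup)
    (d : PySem.Dict String Int) (k : String) :
    (ts.foldl (fun d snap => snap.foldl mergeStep d) d).get? k
      = ts.foldl (fun o snap => omerge o ((PySem.Dict.mk snap).get? k)) (d.get? k) := by
  induction ts generalizing d with
  | nil => rfl
  | cons hd tl ih =>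
      simp only [List.foldl_cons]
      rw [ih (fun s hs => hnd s (List.mem_cons_of_mem _ hs)),
        get?_foldl_mergeStep hd (hnd hd (List.mem_cons_self)) d k]

-- flooring an omerge-fold at 0 is A's running-max fold
theorem floor_omerge_fold (ts : List (List (String × Int))) (k : String) (o : Option Int) :
    max 0 ((ts.foldl (fun o snap => omerge o ((PySem.Dict.mk snap).get? k)) o).getD 0)
      = ts.foldl (fun acc snap => max acc (snapGet snap k)) (max 0 (o.getD 0)) := by
  induction ts generalizing o with
  | nil => rfl
  | cons hd tl ih =>
      simp only [List.foldl_cons, ih]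
      congr 1
      unfold snapGet
      rw [PySem.Dict.getD_eq_get?_getD]
      cases hx : (PySem.Dict.mk hd).get? k with
      | none =>
          cases o with
          | none => simp [omerge]
          | some a => simp [omerge]
      | some v =>
          cases o with
          | none => simp [omerge]
          | some a => simp [omerge, max_assoc]

-- B's value at any key equals A's running maximum for that key
theorem merged_getD_eq (ts : List (List (String × Int)))
    (hnd : ∀ snap ∈ ts, (snap.map Prod.fst).Nodup) (k : String) :
    max 0 ((mergedDict ts).getD k 0)
      = ts.foldl (fun acc snap => max acc (snapGet snap k)) 0 := by
  unfold mergedDict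
  rw [PySem.Dict.getD_eq_get?_getD, get?_mergedFold ts hnd _ k, PySem.Dict.get?_empty,
    floor_omerge_fold]
  rfl

-- A's fused fold splits into three independent folds
theorem fused_foldl_split (ts : List (List (String × Int))) (t a r : Int) :
    ts.foldl
      (fun (acc : Int × Int × Int) snap =>
        (max acc.1 (snapGet snap "consolidation_decisions_total"),
         max acc.2.1 (snapGet snap "consolidation_decisions_accepted"),
         max acc.2.2 (snapGet snap "consolidation_decisions_rejected")))
      (t, a, r)
    = (ts.foldl (fun acc s => max acc (snapGet s "consolidation_decisions_total")) t,
       ts.foldl (fun acc s => max acc (snapGet s "consolidation_decisions_accepted")) a,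
       ts.foldl (fun acc s => max acc (snapGet s "consolidation_decisions_rejected")) r) := by
  induction ts generalizing t a r with
  | nil => rfl
  | cons h tl ih => simp only [List.foldl_cons]; exact ih _ _ _

-- ===== VERDICT (by name: the statement is the Claim_ definition above) =====
theorem extract_decision_counts_spec : Claim_equal_extract_decision_counts := by
  intro ts _ hpre
  show extract_decision_counts ts = extract_decision_counts_alt ts
  simp only [extract_decision_counts, extract_decision_counts_alt, fused_foldl_split,
    List.map_cons, List.map_nil]
  rw [merged_getD_eq ts hpre, merged_getD_eq ts hpre, merged_getD_eq ts hpre]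
  rfl
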